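-- pv_equiv track=rewrite | github.com/mdarud/meta-coding-puzzles | Level2/py/RotatoryLock2.py | getMinCodeEntryTime
-- ===== SOURCE A (Python) =====
-- from typing import List
--
-- def getMinCodeEntryTime(N: int, M: int, C: List[int]) -> int:
--     def rotation_time(a: int, b: int) -> int:
--         """Return the minimum rotation time between two positions on a dial of size N."""
--         return min(abs(a - b), N - abs(a - b))
--
--     # Prepend 1 to simulate both dials starting at position 1
--     code = [1] + C
--
--     # DP table: dp[i][j] = min time to reach i+1-th code, with dial used at j-th step
--     dp = [[0] * M for _ in range(M)]
--
--     for i in range(M - 1, 0, -1):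
--         for j in range(i):
--             move_i = rotation_time(code[i], code[i + 1]) + dp[i][j]
--             move_j = rotation_time(code[j], code[i + 1]) + dp[i][i]
--             dp[i - 1][j] = min(move_i, move_j)
--
--     return rotation_time(1, C[0]) + dp[0][0]
-- ===== SOURCE B (Python) =====
-- from typing import List
--
-- def getMinCodeEntryTime(N: int, M: int, C: List[int]) -> int:
--     def rot(a: int, b: int) -> int:
--         d = abs(a - b)
--         return min(d, N - d)
--
--     code = [1] + C
--     # g[i] = min remaining time after entering code[i+1] with both dials at code[i+1]'s step
--     g = [0] * M
--
--     def best(i: int, p: int) -> int: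
--         # Minimum remaining time after entering code[i+1] with the idle dial at position p:
--         # choose the NEXT step k at which the idle dial is used (or never), paying the
--         # running sum of stay-costs up to k, the switch rotation, and g[k+1].
--         opts = []
--         run = 0
--         for k in range(i, M - 1):
--             opts.append(run + rot(p, code[k + 2]) + g[k + 1])
--             run += rot(code[k + 1], code[k + 2])
--         opts.append(run)
--         return min(opts)
--
--     for i in range(M - 2, -1, -1):
--         g[i] = best(i, code[i])
--     return rot(1, C[0]) + best(0, 1)
-- ===== Notes on version B (the rewrite author's own statement) =====
-- stated objective: alternative
-- what changed: Replaces A's two-dimensional (i,j)-indexed DP table by a 'next-switch-point' recurrence: a single 1-D array g[i] (remaining time when both dials sit at the current code step), each entry computed by scanning the candidate next index k at which the idle dial is used, carrying a running sum of stay costs; no j-indexed dimension is ever stored.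
import Mathlib
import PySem

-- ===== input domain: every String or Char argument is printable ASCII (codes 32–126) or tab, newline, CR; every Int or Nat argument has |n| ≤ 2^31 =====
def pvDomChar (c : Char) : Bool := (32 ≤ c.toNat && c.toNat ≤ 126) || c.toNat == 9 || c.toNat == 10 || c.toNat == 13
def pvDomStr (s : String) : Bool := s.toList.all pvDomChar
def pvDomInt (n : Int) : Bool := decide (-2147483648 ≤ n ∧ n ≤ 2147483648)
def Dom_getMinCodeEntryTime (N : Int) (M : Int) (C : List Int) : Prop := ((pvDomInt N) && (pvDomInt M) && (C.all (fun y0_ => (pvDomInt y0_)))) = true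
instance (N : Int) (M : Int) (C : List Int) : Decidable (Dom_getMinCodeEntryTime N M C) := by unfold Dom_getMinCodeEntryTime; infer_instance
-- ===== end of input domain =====

-- B replaces A's 2-D (i,j) DP table by a 'next-switch-point' recurrence over a single 1-D
-- array g, scanning for each step the next index at which the idle dial is used, with a
-- running sum of stay costs (objective: alternative; same O(M^2) time, O(M) space).

-- ===== PORT A =====
-- rotation_time of A: min(abs(a-b), N-abs(a-b))
def pvRotA (N a b : Int) : Int := min |a - b| (N - |a - b|)

-- the inner 'for j in range(i)' loop of A (body transcribed step for step)
def pvStepA (N : Int) (code : List Int) (dp : List (List Int)) (i : Int) : List (List Int) :=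
  (PySem.List.pyRange 0 i 1).foldl (fun dp j =>
    let move_i := pvRotA N (PySem.List.pyGetD code i 0) (PySem.List.pyGetD code (i + 1) 0)
                    + PySem.List.pyGetD (PySem.List.pyGetD dp i []) j 0
    let move_j := pvRotA N (PySem.List.pyGetD code j 0) (PySem.List.pyGetD code (i + 1) 0)
                    + PySem.List.pyGetD (PySem.List.pyGetD dp i []) i 0
    PySem.List.pySetD dp (i - 1)
      (PySem.List.pySetD (PySem.List.pyGetD dp (i - 1) []) j (min move_i move_j))) dp

def getMinCodeEntryTime (N : Int) (M : Int) (C : List Int) : Int :=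
  let code : List Int := 1 :: C
  let dp0 : List (List Int) := List.replicate M.toNat (List.replicate M.toNat (0 : Int))
  let dp := (PySem.List.pyRange (M - 1) 0 (-1)).foldl (pvStepA N code) dp0
  pvRotA N 1 (PySem.List.pyGetD C 0 0) + PySem.List.pyGetD (PySem.List.pyGetD dp 0 []) 0 0

-- ===== PORT B =====
-- rot of B: binds d = abs(a-b) first
def pvRotB (N a b : Int) : Int :=
  let d := |a - b|
  min d (N - d)

-- Python's min of a nonempty list (the list B builds always contains the final 'run')
def pvMin (l : List Int) : Int := (PySem.List.min? l (fun x => x)).getD 0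

-- the 'for k in range(i, M - 1)' loop of B's helper best: state = (opts, run)
def pvScanB (N : Int) (M : Int) (code g : List Int) (p : Int) (i : Int) : List Int × Int :=
  (PySem.List.pyRange i (M - 1) 1).foldl (fun (st : List Int × Int) k =>
    (st.1 ++ [st.2 + (pvRotB N p (PySem.List.pyGetD code (k + 2) 0)
                        + PySem.List.pyGetD g (k + 1) 0)],
     st.2 + pvRotB N (PySem.List.pyGetD code (k + 1) 0) (PySem.List.pyGetD code (k + 2) 0)))
    ([], 0)

-- B's helper best(i, p): min over the collected options plus the trailing 'run'
def pvBestB (N : Int) (M : Int) (code g : List Int) (i p : Int) : Int :=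
  let st := pvScanB N M code g p i
  pvMin (st.1 ++ [st.2])

def getMinCodeEntryTime_alt (N : Int) (M : Int) (C : List Int) : Int :=
  let code : List Int := 1 :: C
  let g0 : List Int := List.replicate M.toNat (0 : Int)
  let g := (PySem.List.pyRange (M - 2) (-1) (-1)).foldl
    (fun g i => PySem.List.pySetD g i (pvBestB N M code g i (PySem.List.pyGetD code i 0))) g0
  pvRotB N 1 (PySem.List.pyGetD C 0 0) + pvBestB N M code g 0 1

-- ===== PRECONDITION & SPEC =====
-- Pre_: exactly where the Python A returns normally: M ≤ 0 or C = [] raises IndexError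
-- (dp[0][0] / C[0]), and M > len(C) raises IndexError on code[i + 1].
def Pre_getMinCodeEntryTime (N : Int) (M : Int) (C : List Int) : Prop :=
  1 ≤ M ∧ M ≤ (C.length : Int)
instance (N : Int) (M : Int) (C : List Int) : Decidable (Pre_getMinCodeEntryTime N M C) := by
  unfold Pre_getMinCodeEntryTime; infer_instance

def pvWitness_getMinCodeEntryTime : Int × Int × List Int := (10, 2, [3, 7])

def Spec_getMinCodeEntryTime (N : Int) (M : Int) (C : List Int) (out : Int) : Prop := out = getMinCodeEntryTime_alt N M C
instance (N : Int) (M : Int) (C : List Int) (out : Int) : Decidable (Spec_getMinCodeEntryTime N M C out) := by unfold Spec_getMinCodeEntryTime; infer_instance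

-- ===== CLAIM (what is proved, stated in full; the proofs are below) =====
def Claim_equal_getMinCodeEntryTime : Prop := ∀ (N : Int) (M : Int) (C : List Int), Dom_getMinCodeEntryTime N M C → Pre_getMinCodeEntryTime N M C → Spec_getMinCodeEntryTime N M C (getMinCodeEntryTime N M C)

-- ===== LEMMAS AND PROOFS =====

-- The shared recurrence: pvG i j = dp[i][j] of A = remaining time with the idle dial at j.
def pvG (N : Int) (code : List Int) (m i j : Nat) : Int :=
  if h : i + 1 < m then
    min (pvRotA N (code.getD (i + 1) 0) (code.getD (i + 1 + 1) 0) + pvG N code m (i + 1) j)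
        (pvRotA N (code.getD j 0) (code.getD (i + 1 + 1) 0) + pvG N code m (i + 1) (i + 1))
  else 0
termination_by m - i
decreasing_by all_goals omega

lemma pvG_base (N : Int) (code : List Int) (m i j : Nat) (h : ¬ i + 1 < m) :
    pvG N code m i j = 0 := by rw [pvG]; simp [h]

lemma pvG_step (N : Int) (code : List Int) (m i j : Nat) (h : i + 1 < m) :
    pvG N code m i j =
      min (pvRotA N (code.getD (i + 1) 0) (code.getD (i + 1 + 1) 0) + pvG N code m (i + 1) j)
          (pvRotA N (code.getD j 0) (code.getD (i + 1 + 1) 0) + pvG N code m (i + 1) (i + 1)) := by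
  rw [pvG]; simp [h]

lemma pvRotB_eq (N a b : Int) : pvRotB N a b = pvRotA N a b := rfl

lemma pv_getD_set_self {α : Type} (l : List α) (a : Nat) (v d : α) (h : a < l.length) :
    (l.set a v).getD a d = v := by
  simp [List.getD_eq_getElem?_getD, List.getElem?_set_self h]

lemma pv_getD_set_ne {α : Type} (l : List α) (a b : Nat) (v d : α) (h : a ≠ b) :
    (l.set a v).getD b d = l.getD b d := by
  simp [List.getD_eq_getElem?_getD, List.getElem?_set_ne h]

-- A's inner loop cut off after the first J iterations
def pvInner (N : Int) (code : List Int) (i : Int) (dp : List (List Int)) (J : Nat) : List (List Int) :=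
  (PySem.List.pyRange 0 (J : Int) 1).foldl (fun dp j =>
    PySem.List.pySetD dp (i - 1)
      (PySem.List.pySetD (PySem.List.pyGetD dp (i - 1) []) j
        (min (pvRotA N (PySem.List.pyGetD code i 0) (PySem.List.pyGetD code (i + 1) 0)
                + PySem.List.pyGetD (PySem.List.pyGetD dp i []) j 0)
             (pvRotA N (PySem.List.pyGetD code j 0) (PySem.List.pyGetD code (i + 1) 0)
                + PySem.List.pyGetD (PySem.List.pyGetD dp i []) i 0)))) dp

lemma pvStepA_eq_inner (N : Int) (code : List Int) (dp : List (List Int)) (i : Int)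
    (h : 0 ≤ i) : pvStepA N code dp i = pvInner N code i dp i.toNat := by
  unfold pvStepA pvInner
  rw [Int.toNat_of_nonneg h]

lemma pvInner_zero (N : Int) (code : List Int) (i : Int) (dp : List (List Int)) :
    pvInner N code i dp 0 = dp := by
  simp [pvInner, PySem.List.pyRange_one_eq_nil (le_refl 0)]

lemma pvInner_succ (N : Int) (code : List Int) (i : Int) (dp : List (List Int)) (J : Nat) :
    pvInner N code i dp (J + 1) =
      PySem.List.pySetD (pvInner N code i dp J) (i - 1)
        (PySem.List.pySetD (PySem.List.pyGetD (pvInner N code i dp J) (i - 1) []) (J : Int)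
          (min (pvRotA N (PySem.List.pyGetD code i 0) (PySem.List.pyGetD code (i + 1) 0)
                  + PySem.List.pyGetD (PySem.List.pyGetD (pvInner N code i dp J) i []) (J : Int) 0)
               (pvRotA N (PySem.List.pyGetD code (J : Int) 0) (PySem.List.pyGetD code (i + 1) 0)
                  + PySem.List.pyGetD (PySem.List.pyGetD (pvInner N code i dp J) i []) i 0))) := by
  unfold pvInner
  rw [show ((J + 1 : Nat) : Int) = (J : Int) + 1 by push_cast; ring,
      PySem.List.pyRange_one_succ_right (Int.natCast_nonneg J), List.foldl_append]
  rfl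

lemma pvInnerA_spec (N : Int) (code : List Int) (m s : Nat) (hs : s + 1 < m)
    (dp : List (List Int)) (hlen : dp.length = m) (hrows : ∀ r ∈ dp, r.length = m)
    (hrow : ∀ j : Nat, j ≤ s + 1 → (dp.getD (s + 1) []).getD j 0 = pvG N code m (s + 1) j) :
    ∀ J : Nat, J ≤ s + 1 →
      (pvInner N code ((s + 1 : Nat) : Int) dp J).length = m ∧
      (∀ r ∈ pvInner N code ((s + 1 : Nat) : Int) dp J, r.length = m) ∧
      (pvInner N code ((s + 1 : Nat) : Int) dp J).getD (s + 1) [] = dp.getD (s + 1) [] ∧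
      (∀ j : Nat, j < J →
        ((pvInner N code ((s + 1 : Nat) : Int) dp J).getD s []).getD j 0 = pvG N code m s j) := by
  intro J
  induction J with
  | zero =>
    intro _
    rw [pvInner_zero]
    exact ⟨hlen, hrows, rfl, fun j hj => absurd hj (by omega)⟩
  | succ J ih =>
    intro hJ1
    have hJ : J ≤ s + 1 := by omega
    obtain ⟨ih1, ih2, ih3, ih4⟩ := ih hJ
    have e1 : ((s + 1 : Nat) : Int) - 1 = ((s : Nat) : Int) := by push_cast; ring
    have e2 : ((s + 1 : Nat) : Int) + 1 = ((s + 1 + 1 : Nat) : Int) := by push_cast; ring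
    rw [pvInner_succ, e1, e2]
    simp only [PySem.List.pySetD_natCast, PySem.List.pyGetD_natCast]
    set D := pvInner N code ((s + 1 : Nat) : Int) dp J with hD
    have hslen : (D.getD s []).length = m := by
      have hsm : s < D.length := by omega
      rw [List.getD_eq_getElem D [] hsm]
      exact ih2 _ (List.getElem_mem hsm)
    have hv : min (pvRotA N (code.getD (s + 1) 0) (code.getD (s + 1 + 1) 0)
                    + (D.getD (s + 1) []).getD J 0)
                  (pvRotA N (code.getD J 0) (code.getD (s + 1 + 1) 0)
                    + (D.getD (s + 1) []).getD (s + 1) 0) = pvG N code m s J := by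
      rw [ih3, hrow J hJ, hrow (s + 1) (le_refl _), pvG_step N code m s J hs]
    refine ⟨by simp [List.length_set, ih1], ?_, ?_, ?_⟩
    · intro r hr
      rcases List.mem_or_eq_of_mem_set hr with h | h
      · exact ih2 r h
      · rw [h, List.length_set]; exact hslen
    · rw [pv_getD_set_ne D s (s + 1) _ [] (by omega)]
      exact ih3
    · intro j hj
      rw [pv_getD_set_self D s _ [] (by omega)]
      by_cases hje : j = J
      · subst hje
        rw [pv_getD_set_self (D.getD s []) j _ 0 (by omega), hv]
      · rw [pv_getD_set_ne (D.getD s []) J j _ 0 (by omega)]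
        exact ih4 j (by omega)

lemma pvOuterA_spec (N : Int) (code : List Int) (m : Nat) :
    ∀ t : Nat, t < m → ∀ dp : List (List Int), dp.length = m → (∀ r ∈ dp, r.length = m) →
    (∀ j : Nat, j ≤ t → (dp.getD t []).getD j 0 = pvG N code m t j) →
    ((((PySem.List.pyRange (t : Int) 0 (-1)).foldl (pvStepA N code) dp).getD 0 []).getD 0 0)
      = pvG N code m 0 0 := by
  intro t
  induction t with
  | zero =>
    intro _ dp _ _ hrow
    simp only [Nat.cast_zero]
    rw [PySem.List.pyRange_neg_one_eq_nil (le_refl 0)]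
    simpa using hrow 0 (le_refl 0)
  | succ t ih =>
    intro hm dp h1 h2 h3
    rw [PySem.List.pyRange_neg_one_cons (by exact_mod_cast Nat.succ_pos t),
        show ((t + 1 : Nat) : Int) - 1 = ((t : Nat) : Int) by push_cast; ring,
        List.foldl_cons,
        pvStepA_eq_inner N code dp _ (Int.natCast_nonneg _),
        show ((t + 1 : Nat) : Int).toNat = t + 1 by omega]
    obtain ⟨p1, p2, p3, p4⟩ := pvInnerA_spec N code m t hm dp h1 h2 h3 (t + 1) (le_refl _)
    exact ih (by omega) _ p1 p2 (fun j hj => p4 j (by omega))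

lemma pv_getD_replicate_zero (m j : Nat) : (List.replicate m (0 : Int)).getD j 0 = 0 := by
  rw [List.getD_eq_getElem?_getD, List.getElem?_replicate]
  split <;> rfl

lemma portA_eq (N M : Int) (C : List Int) (hM : 1 ≤ M) :
    getMinCodeEntryTime N M C
      = pvRotA N 1 (C.getD 0 0) + pvG N (1 :: C) M.toNat 0 0 := by
  simp only [getMinCodeEntryTime]
  rw [PySem.List.pyGetD_zero, PySem.List.pyGetD_zero, PySem.List.pyGetD_zero]
  rw [show M - 1 = ((M.toNat - 1 : Nat) : Int) by omega]
  rw [pvOuterA_spec N (1 :: C) M.toNat (M.toNat - 1) (by omega)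
        (List.replicate M.toNat (List.replicate M.toNat 0))
        (by simp)
        (by intro r hr; rw [List.eq_of_mem_replicate hr]; simp)
        ?_]
  intro j hj
  rw [pvG_base N (1 :: C) M.toNat (M.toNat - 1) j (by omega)]
  rw [List.getD_replicate _ (show M.toNat - 1 < M.toNat by omega)]
  exact pv_getD_replicate_zero _ _

-- ===== B-side lemmas =====

-- pvG depends on j only through code[j]
def pvH (N : Int) (code : List Int) (m i : Nat) (p : Int) : Int :=
  if h : i + 1 < m then
    min (pvRotA N (code.getD (i + 1) 0) (code.getD (i + 1 + 1) 0) + pvH N code m (i + 1) p)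
        (pvRotA N p (code.getD (i + 1 + 1) 0) + pvH N code m (i + 1) (code.getD (i + 1) 0))
  else 0
termination_by m - i
decreasing_by all_goals omega

lemma pvH_base (N : Int) (code : List Int) (m i : Nat) (p : Int) (h : ¬ i + 1 < m) :
    pvH N code m i p = 0 := by rw [pvH]; simp [h]

lemma pvH_step (N : Int) (code : List Int) (m i : Nat) (p : Int) (h : i + 1 < m) :
    pvH N code m i p =
      min (pvRotA N (code.getD (i + 1) 0) (code.getD (i + 1 + 1) 0) + pvH N code m (i + 1) p)
          (pvRotA N p (code.getD (i + 1 + 1) 0) + pvH N code m (i + 1) (code.getD (i + 1) 0)) := by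
  rw [pvH]; simp [h]

lemma pvG_eq_pvH (N : Int) (code : List Int) (m : Nat) :
    ∀ d i j : Nat, m - i ≤ d → pvG N code m i j = pvH N code m i (code.getD j 0) := by
  intro d
  induction d with
  | zero =>
    intro i j hd
    rw [pvG_base N code m i j (by omega), pvH_base N code m i _ (by omega)]
  | succ d ih =>
    intro i j hd
    by_cases h : i + 1 < m
    · rw [pvG_step N code m i j h, pvH_step N code m i _ h,
          ih (i + 1) j (by omega), ih (i + 1) (i + 1) (by omega)]
    · rw [pvG_base N code m i j h, pvH_base N code m i _ h]

-- running-offset decomposition of B's scan loop (generic in the per-step functions)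
lemma pvFoldShift (c s : Int → Int) (L : List Int) :
    ∀ (acc : List Int) (r : Int),
      L.foldl (fun (st : List Int × Int) k => (st.1 ++ [st.2 + c k], st.2 + s k)) (acc, r)
        = (acc ++ (L.foldl (fun (st : List Int × Int) k => (st.1 ++ [st.2 + c k], st.2 + s k)) ([], 0)).1.map (fun x => r + x),
           r + (L.foldl (fun (st : List Int × Int) k => (st.1 ++ [st.2 + c k], st.2 + s k)) ([], 0)).2) := by
  induction L with
  | nil => intro acc r; simp
  | cons k L ih =>
    intro acc r
    simp only [List.foldl_cons]
    rw [ih (acc ++ [r + c k]) (r + s k), ih ([] ++ [0 + c k]) (0 + s k)]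
    simp [List.map_map, Function.comp_def, add_assoc]

lemma pv_foldl_min_shift (l : List Int) : ∀ a b : Int, l.foldl min (min a b) = min a (l.foldl min b) := by
  induction l with
  | nil => intro a b; rfl
  | cons y l ih =>
    intro a b
    simp only [List.foldl_cons]
    rw [show min (min a b) y = min a (min b y) by omega, ih]

lemma pvMin_cons (x : Int) (l : List Int) : pvMin (x :: l) = l.foldl min x := by
  simp [pvMin, PySem.List.min?_id_cons]

lemma pvMin_cons_of_ne_nil (x : Int) (l : List Int) (h : l ≠ []) :
    pvMin (x :: l) = min x (pvMin l) := by
  cases l with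
  | nil => exact absurd rfl h
  | cons y t => rw [pvMin_cons, pvMin_cons, List.foldl_cons, pv_foldl_min_shift]

lemma pv_foldl_min_map_add (r : Int) (l : List Int) :
    ∀ x : Int, (l.map (fun z => r + z)).foldl min (r + x) = r + l.foldl min x := by
  induction l with
  | nil => intro x; rfl
  | cons y l ih =>
    intro x
    simp only [List.map_cons, List.foldl_cons]
    rw [show min (r + x) (r + y) = r + min x y by omega, ih]

lemma pvMin_map_add (r : Int) (l : List Int) (h : l ≠ []) :
    pvMin (l.map (fun z => r + z)) = r + pvMin l := by
  cases l with
  | nil => exact absurd rfl h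
  | cons y t =>
    simp only [List.map_cons]
    rw [pvMin_cons, pvMin_cons, pv_foldl_min_map_add]

lemma pvBestB_spec (N : Int) (code : List Int) (m : Nat) (g : List Int) :
    ∀ (d i : Nat) (p : Int), i < m → m - i ≤ d →
      (∀ t : Nat, i < t → t < m → g.getD t 0 = pvH N code m t (code.getD t 0)) →
      pvBestB N (m : Int) code g (i : Int) p = pvH N code m i p := by
  intro d
  induction d with
  | zero => intro i p him hd _; omega
  | succ d ih =>
    intro i p him hd hg
    by_cases h : i + 1 < m
    · have hrange : PySem.List.pyRange (i : Int) ((m : Int) - 1) 1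
          = (i : Int) :: PySem.List.pyRange ((i : Int) + 1) ((m : Int) - 1) 1 :=
        PySem.List.pyRange_one_cons (by omega)
      have hcast1 : (i : Int) + 1 = ((i + 1 : Nat) : Int) := by push_cast; ring
      have hcast2 : (i : Int) + 2 = ((i + 1 + 1 : Nat) : Int) := by push_cast; ring
      simp only [pvBestB, pvScanB]
      rw [hrange, List.foldl_cons]
      rw [pvFoldShift]
      have hrest : (PySem.List.pyRange ((i : Int) + 1) ((m : Int) - 1) 1).foldl
          (fun (st : List Int × Int) k =>
            (st.1 ++ [st.2 + (pvRotB N p (PySem.List.pyGetD code (k + 2) 0)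
                                + PySem.List.pyGetD g (k + 1) 0)],
             st.2 + pvRotB N (PySem.List.pyGetD code (k + 1) 0) (PySem.List.pyGetD code (k + 2) 0)))
          ([], 0) = pvScanB N (m : Int) code g p ((i + 1 : Nat) : Int) := by
        simp only [pvScanB, hcast1]
      rw [hrest]
      set T := pvScanB N (m : Int) code g p ((i + 1 : Nat) : Int) with hT
      have hBnext : pvMin (T.1 ++ [T.2]) = pvH N code m (i + 1) p := by
        have := ih (i + 1) p h (by omega)
          (fun t h1 h2 => hg t (by omega) h2)
        simpa only [pvBestB, ← hT] using this
      have hne : T.1 ++ [T.2] ≠ [] := by simp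
      have hlist :
          (([] : List Int) ++ [0 + (pvRotB N p (PySem.List.pyGetD code ((i : Int) + 2) 0)
              + PySem.List.pyGetD g ((i : Int) + 1) 0)])
            ++ T.1.map (fun x => (0 + pvRotB N (PySem.List.pyGetD code ((i : Int) + 1) 0)
                (PySem.List.pyGetD code ((i : Int) + 2) 0)) + x)
            ++ [(0 + pvRotB N (PySem.List.pyGetD code ((i : Int) + 1) 0)
                (PySem.List.pyGetD code ((i : Int) + 2) 0)) + T.2]
          = (0 + (pvRotB N p (PySem.List.pyGetD code ((i : Int) + 2) 0)
              + PySem.List.pyGetD g ((i : Int) + 1) 0))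
            :: (T.1 ++ [T.2]).map (fun x => (0 + pvRotB N (PySem.List.pyGetD code ((i : Int) + 1) 0)
                (PySem.List.pyGetD code ((i : Int) + 2) 0)) + x) := by
        simp
      rw [hlist, pvMin_cons_of_ne_nil _ _ (by simp), pvMin_map_add _ _ hne, hBnext]
      rw [hcast1, hcast2]
      simp only [PySem.List.pyGetD_natCast, pvRotB_eq, zero_add]
      rw [hg (i + 1) (by omega) (by omega), pvH_step N code m i p h]
      omega
    · simp only [pvBestB, pvScanB]
      rw [PySem.List.pyRange_one_eq_nil (by omega : (m : Int) - 1 ≤ (i : Int))]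
      simp only [List.foldl_nil, List.nil_append]
      rw [pvH_base N code m i p h, pvMin_cons]
      rfl

lemma pvOuterB_spec (N : Int) (code : List Int) (m : Nat) :
    ∀ (d : Nat) (a : Int), a < (m : Int) → (a + 1).toNat ≤ d → ∀ g : List Int, g.length = m →
      (∀ t : Nat, a < (t : Int) → t < m → g.getD t 0 = pvH N code m t (code.getD t 0)) →
      ∀ t : Nat, t < m →
        ((PySem.List.pyRange a (-1) (-1)).foldl
            (fun g i => PySem.List.pySetD g i (pvBestB N (m : Int) code g i (PySem.List.pyGetD code i 0))) g).getD t 0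
          = pvH N code m t (code.getD t 0) := by
  intro d
  induction d with
  | zero =>
    intro a ha hd g hlen hg t ht
    rw [PySem.List.pyRange_neg_one_eq_nil (by omega : a ≤ -1)]
    exact hg t (by omega) ht
  | succ d ih =>
    intro a ha hd g hlen hg t ht
    by_cases h0 : a ≤ -1
    · rw [PySem.List.pyRange_neg_one_eq_nil h0]
      exact hg t (by omega) ht
    · have ha0 : 0 ≤ a := by omega
      have hcast : a = ((a.toNat : Nat) : Int) := by omega
      rw [PySem.List.pyRange_neg_one_cons (by omega : (-1 : Int) < a), List.foldl_cons]
      have hbest : pvBestB N (m : Int) code g a (PySem.List.pyGetD code a 0)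
          = pvH N code m a.toNat (code.getD a.toNat 0) := by
        rw [hcast]
        simp only [PySem.List.pyGetD_natCast]
        exact pvBestB_spec N code m g m a.toNat _ (by omega) (by omega)
          (fun t h1 h2 => hg t (by omega) h2)
      rw [hcast]
      simp only [PySem.List.pySetD_natCast]
      refine ih (((a.toNat : Nat) : Int) - 1) (by omega) (by omega) _ ?_ ?_ t ht
      · simp [hlen]
      intro t' h1 h2
      by_cases hte : t' = a.toNat
      · subst hte
        rw [pv_getD_set_self _ _ _ _ (by omega), ← hcast, hbest]
      · rw [pv_getD_set_ne _ _ _ _ _ (by omega)]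
        exact hg t' (by omega) h2

lemma portB_eq (N M : Int) (C : List Int) (hM : 1 ≤ M) :
    getMinCodeEntryTime_alt N M C
      = pvRotA N 1 (C.getD 0 0) + pvG N (1 :: C) M.toNat 0 0 := by
  obtain ⟨m, rfl⟩ : ∃ m : Nat, M = (m : Int) := ⟨M.toNat, by omega⟩
  simp only [getMinCodeEntryTime_alt, Int.toNat_natCast]
  rw [PySem.List.pyGetD_zero, pvRotB_eq]
  have hfin : ∀ t : Nat, t < m →
      ((PySem.List.pyRange ((m : Int) - 2) (-1) (-1)).foldl
          (fun g i => PySem.List.pySetD g i (pvBestB N (m : Int) (1 :: C) g i (PySem.List.pyGetD (1 :: C) i 0)))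
          (List.replicate m 0)).getD t 0
        = pvH N (1 :: C) m t ((1 :: C).getD t 0) := by
    intro t ht
    refine pvOuterB_spec N (1 :: C) m m ((m : Int) - 2) (by omega) (by omega) _ (by simp) ?_ t ht
    intro t' h1 h2
    rw [pv_getD_replicate_zero, pvH_base N (1 :: C) m t' _ (by omega)]
  have hB : pvBestB N (m : Int) (1 :: C)
      ((PySem.List.pyRange ((m : Int) - 2) (-1) (-1)).foldl
          (fun g i => PySem.List.pySetD g i (pvBestB N (m : Int) (1 :: C) g i (PySem.List.pyGetD (1 :: C) i 0)))
          (List.replicate m 0)) 0 1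
      = pvH N (1 :: C) m 0 1 := by
    have h := pvBestB_spec N (1 :: C) m
        ((PySem.List.pyRange ((m : Int) - 2) (-1) (-1)).foldl
          (fun g i => PySem.List.pySetD g i (pvBestB N (m : Int) (1 :: C) g i (PySem.List.pyGetD (1 :: C) i 0)))
          (List.replicate m 0)) m 0 1 (by omega) (by omega)
        (fun t h1 h2 => hfin t h2)
    simpa using h
  rw [pvG_eq_pvH N (1 :: C) m m 0 0 (by omega)]
  rw [show ((1 :: C).getD 0 0) = 1 from rfl]
  rw [hB]

-- ===== VERDICT (by name: the statement is the Claim_ definition above) =====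
theorem getMinCodeEntryTime_spec : Claim_equal_getMinCodeEntryTime := by
  intro N M C _ hPre
  unfold Spec_getMinCodeEntryTime
  rw [portA_eq N M C hPre.1, portB_eq N M C hPre.1]
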